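-- pv_equiv track=rewrite | github.com/alexandreseverogh/BI_MODERNO | callbacks/atendimentos.py | format_and_sort_items
-- ===== SOURCE A (Python) =====
-- def format_and_sort_items(items):
--     formatted_items = []
--     for item in items:
--         nome = item['nome'].strip() if item['nome'] else "Em Branco"
--         formatted_items.append({
--             'id': item['id'],
--             'nome': nome
--         })
--     # Sort by name, putting "Em Branco" at the beginning if it exists
--     return sorted(formatted_items, key=lambda x: ("" if x['nome'] == "Em Branco" else x['nome']))
-- ===== SOURCE B (Python) =====
-- def format_and_sort_items(items):
--     # Partition-then-sort: blank-keyed items (nome falsy -> "Em Branco", or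
--     # whitespace-only -> "") keep their original order up front; only the
--     # remaining items are sorted by name.
--     front = []
--     rest = []
--     for item in items:
--         raw = item['nome']
--         nome = raw.strip() if raw else "Em Branco"
--         d = {'id': item['id'], 'nome': nome}
--         if nome == "Em Branco" or nome == "":
--             front.append(d)
--         else:
--             rest.append(d)
--     rest.sort(key=lambda x: x['nome'])
--     return front + rest
-- ===== Notes on version B (the rewrite author's own statement) =====
-- stated objective: alternative
-- what changed: Replaces the single keyed sort with a sentinel key by a one-pass partition into blank-keyed items (kept in original order) and the rest, then sorts only the rest by name and concatenates.
import Mathlib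
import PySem

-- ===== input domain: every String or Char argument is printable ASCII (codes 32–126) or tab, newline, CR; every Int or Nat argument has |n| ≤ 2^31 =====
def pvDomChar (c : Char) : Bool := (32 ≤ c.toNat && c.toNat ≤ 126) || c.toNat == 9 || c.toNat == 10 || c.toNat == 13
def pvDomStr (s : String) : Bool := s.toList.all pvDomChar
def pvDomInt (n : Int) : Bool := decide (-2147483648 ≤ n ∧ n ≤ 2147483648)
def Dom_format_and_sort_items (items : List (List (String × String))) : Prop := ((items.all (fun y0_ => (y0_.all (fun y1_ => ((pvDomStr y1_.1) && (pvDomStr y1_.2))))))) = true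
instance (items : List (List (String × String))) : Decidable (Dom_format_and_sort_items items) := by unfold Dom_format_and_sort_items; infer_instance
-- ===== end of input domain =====

-- B differs from A only in decomposition (one-pass partition + sort of the non-blank part instead
-- of one keyed sort over everything); equal return value on every input where A returns.

-- dict lookup on the assoc-list representation of a Python dict: first match (shared primitive)
def pvLookup (d : List (String × String)) (k : String) : Option String :=
  (d.find? (fun p => p.1 == k)).map (fun p => p.2)

-- ===== PORT A =====
-- nome = item['nome'].strip() if item['nome'] else "Em Branco"
def pvNomeA (item : List (String × String)) : String :=
  let raw := (pvLookup item "nome").getD ""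
  if raw ≠ "" then PySem.Str.strip raw else "Em Branco"

-- {'id': item['id'], 'nome': nome}
def pvFmtA (item : List (String × String)) : List (String × String) :=
  [("id", (pvLookup item "id").getD ""), ("nome", pvNomeA item)]

-- key=lambda x: ("" if x['nome'] == "Em Branco" else x['nome'])
def pvKeyA (x : List (String × String)) : String :=
  if (pvLookup x "nome").getD "" = "Em Branco" then "" else (pvLookup x "nome").getD ""

def format_and_sort_items (items : List (List (String × String))) : List (List (String × String)) :=
  let formatted_items := items.map pvFmtA
  PySem.List.sorted formatted_items pvKeyA

-- ===== PORT B =====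
-- key=lambda x: x['nome']
def pvKeyB (x : List (String × String)) : String := (pvLookup x "nome").getD ""

def format_and_sort_items_alt (items : List (List (String × String))) : List (List (String × String)) :=
  let p := items.foldl
    (fun (acc : List (List (String × String)) × List (List (String × String))) item =>
      let raw := (pvLookup item "nome").getD ""
      let nome := if raw ≠ "" then PySem.Str.strip raw else "Em Branco"
      let d : List (String × String) := [("id", (pvLookup item "id").getD ""), ("nome", nome)]
      if nome = "Em Branco" ∨ nome = "" then (acc.1 ++ [d], acc.2) else (acc.1, acc.2 ++ [d]))
    ([], [])
  p.1 ++ PySem.List.sorted p.2 pvKeyB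

-- ===== PRECONDITION & SPEC =====
-- Pre_ excludes exactly the inputs on which Python A raises KeyError: an item missing key 'nome' or 'id'.
def Pre_format_and_sort_items (items : List (List (String × String))) : Prop :=
  (items.all (fun item => (pvLookup item "nome").isSome && (pvLookup item "id").isSome)) = true
instance (items : List (List (String × String))) : Decidable (Pre_format_and_sort_items items) := by unfold Pre_format_and_sort_items; infer_instance

def pvWitness_format_and_sort_items : (List (List (String × String))) :=
  [[("id", "1"), ("nome", "  b ")], [("id", "2"), ("nome", "")], [("id", "3"), ("nome", "a")]]

def Spec_format_and_sort_items (items : List (List (String × String))) (out : List (List (String × String))) : Prop := out = format_and_sort_items_alt items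
instance (items : List (List (String × String))) (out : List (List (String × String))) : Decidable (Spec_format_and_sort_items items out) := by unfold Spec_format_and_sort_items; infer_instance

-- ===== CLAIM (what is proved, stated in full; the proofs are below) =====
def Claim_equal_format_and_sort_items : Prop := ∀ (items : List (List (String × String))), Dom_format_and_sort_items items → Pre_format_and_sort_items items → Spec_format_and_sort_items items (format_and_sort_items items)

-- ===== LEMMAS AND PROOFS =====

theorem pv_not_lt_empty (s : String) : ¬ s < "" := by
  simp [String.lt_iff_toList_lt]

theorem pv_empty_lt (s : String) (h : s ≠ "") : ("" : String) < s := by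
  rw [String.lt_iff_toList_lt]
  cases hs : s.toList with
  | nil => exact absurd (String.toList_inj.mp (by rw [hs]; rfl)) h
  | cons a l => exact List.nil_lt_cons a l

theorem pv_insertBy_skip {α : Type} (before : α → α → Bool) (x : α) (F S : List α)
    (hF : ∀ y ∈ F, before x y = false) :
    PySem.List.insertBy before x (F ++ S) = F ++ PySem.List.insertBy before x S := by
  induction F with
  | nil => simp
  | cons a F ih =>
    simp only [List.cons_append, PySem.List.insertBy]
    rw [hF a (by simp)]
    simp only [Bool.false_eq_true, if_false]
    rw [ih (fun y hy => hF y (by simp [hy]))]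

theorem pv_insertBy_front {α : Type} (before : α → α → Bool) (x : α) (S : List α)
    (hS : ∀ y ∈ S, before x y = true) :
    PySem.List.insertBy before x S = x :: S := by
  cases S with
  | nil => rfl
  | cons a S => simp [PySem.List.insertBy, hS a (by simp)]

theorem pv_insertBy_congr {α : Type} (b1 b2 : α → α → Bool) (x : α) (ys : List α)
    (h : ∀ y ∈ ys, b1 x y = b2 x y) :
    PySem.List.insertBy b1 x ys = PySem.List.insertBy b2 x ys := by
  induction ys with
  | nil => rfl
  | cons a ys ih =>
    simp only [PySem.List.insertBy]
    rw [h a (by simp), ih (fun y hy => h y (by simp [hy]))]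

-- sorted is key-extensional on the list's members
theorem pv_foldl_ins_congr (k1 k2 : List (String × String) → String)
    (xs acc : List (List (String × String)))
    (hx : ∀ y ∈ xs, k1 y = k2 y) (ha : ∀ y ∈ acc, k1 y = k2 y) :
    xs.foldl (fun acc x => PySem.List.insertBy (fun a b => decide (k1 a < k1 b)) x acc) acc
      = xs.foldl (fun acc x => PySem.List.insertBy (fun a b => decide (k2 a < k2 b)) x acc) acc := by
  induction xs generalizing acc with
  | nil => rfl
  | cons a xs ih =>
    simp only [List.foldl_cons]
    rw [pv_insertBy_congr _ (fun a b => decide (k2 a < k2 b)) a acc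
        (fun y hy => by rw [hx a (by simp), ha y hy])]
    refine ih _ (fun y hy => hx y (by simp [hy])) (fun y hy => ?_)
    rcases (PySem.List.mem_insertBy _ a y acc).mp hy with h | h
    · rw [h]; exact hx a (by simp)
    · exact ha y h

theorem pv_sorted_congr (xs : List (List (String × String)))
    (k1 k2 : List (String × String) → String) (h : ∀ y ∈ xs, k1 y = k2 y) :
    PySem.List.sorted xs k1 = PySem.List.sorted xs k2 := by
  rw [PySem.List.sorted_eq_foldl_insertBy, PySem.List.sorted_eq_foldl_insertBy]
  exact pv_foldl_ins_congr k1 k2 xs [] h (by simp)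

theorem pv_sorted_append_singleton (R : List (List (String × String))) (x : List (String × String))
    (k : List (String × String) → String) :
    PySem.List.sorted (R ++ [x]) k
      = PySem.List.insertBy (fun a b => decide (k a < k b)) x (PySem.List.sorted R k) := by
  rw [PySem.List.sorted_eq_foldl_insertBy, List.foldl_append, List.foldl_cons, List.foldl_nil,
      ← PySem.List.sorted_eq_foldl_insertBy]

-- split lemma: "" is the minimum key, so the stable sort puts the key-"" items first, in order
theorem pv_sorted_split (L : List (List (String × String))) :
    PySem.List.sorted L pvKeyA =
      L.filter (fun d => pvKeyA d == "") ++
        PySem.List.sorted (L.filter (fun d => !(pvKeyA d == ""))) pvKeyA := by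
  induction L using List.reverseRecOn with
  | nil => rfl
  | append_singleton L x ih =>
    rw [pv_sorted_append_singleton, ih]
    by_cases hx : pvKeyA x = ""
    · have h1 : (L ++ [x]).filter (fun d => pvKeyA d == "") =
          L.filter (fun d => pvKeyA d == "") ++ [x] := by simp [List.filter_append, hx]
      have h2 : (L ++ [x]).filter (fun d => !(pvKeyA d == "")) =
          L.filter (fun d => !(pvKeyA d == "")) := by simp [List.filter_append, hx]
      rw [h1, h2]
      rw [pv_insertBy_skip _ x _ _ (fun y hy => by
        have hy' : pvKeyA y = "" := by simpa using List.of_mem_filter hy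
        simp only [hx, hy', decide_eq_false_iff_not]
        exact pv_not_lt_empty "")]
      rw [pv_insertBy_front _ x _ (fun y hy => by
        have hy' : ¬ pvKeyA y = "" := by
          simpa using List.of_mem_filter ((PySem.List.mem_sorted _ _ _ _).mp hy)
        simp only [hx, decide_eq_true_eq]
        exact pv_empty_lt _ hy')]
      simp
    · have h1 : (L ++ [x]).filter (fun d => pvKeyA d == "") =
          L.filter (fun d => pvKeyA d == "") := by simp [List.filter_append, hx]
      have h2 : (L ++ [x]).filter (fun d => !(pvKeyA d == "")) =
          L.filter (fun d => !(pvKeyA d == "")) ++ [x] := by simp [List.filter_append, hx]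
      rw [h1, h2, pv_sorted_append_singleton]
      rw [pv_insertBy_skip _ x _ _ (fun y hy => by
        have hy' : pvKeyA y = "" := by simpa using List.of_mem_filter hy
        simp only [hy', decide_eq_false_iff_not]
        exact pv_not_lt_empty _)]

-- the value B's loop binds to 'nome' is pvNomeA, and B's dict literal is pvFmtA
theorem pv_keyA_fmt (item : List (String × String)) :
    pvKeyA (pvFmtA item) = (if pvNomeA item = "Em Branco" then "" else pvNomeA item) := by
  simp only [pvKeyA, pvFmtA, pvLookup, List.find?]
  rw [show (("id" : String) == "nome") = false from by decide,
      show (("nome" : String) == "nome") = true from by decide]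
  rfl

theorem pv_keyA_eq_empty_iff (item : List (String × String)) :
    (pvKeyA (pvFmtA item) = "") ↔ (pvNomeA item = "Em Branco" ∨ pvNomeA item = "") := by
  rw [pv_keyA_fmt]
  by_cases h : pvNomeA item = "Em Branco" <;> simp [h]

-- B's loop is a partition of the formatted list along pvKeyA = ""
theorem pv_fold_partition (items : List (List (String × String)))
    (F0 R0 : List (List (String × String))) :
    items.foldl
      (fun (acc : List (List (String × String)) × List (List (String × String))) item =>
        let raw := (pvLookup item "nome").getD ""
        let nome := if raw ≠ "" then PySem.Str.strip raw else "Em Branco"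
        let d : List (String × String) := [("id", (pvLookup item "id").getD ""), ("nome", nome)]
        if nome = "Em Branco" ∨ nome = "" then (acc.1 ++ [d], acc.2) else (acc.1, acc.2 ++ [d]))
      (F0, R0)
    = (F0 ++ (items.map pvFmtA).filter (fun d => pvKeyA d == ""),
       R0 ++ (items.map pvFmtA).filter (fun d => !(pvKeyA d == ""))) := by
  induction items generalizing F0 R0 with
  | nil => simp
  | cons item items ih =>
    simp only [List.foldl_cons, List.map_cons, List.filter_cons]
    rw [show (if (pvLookup item "nome").getD "" ≠ "" then
          PySem.Str.strip ((pvLookup item "nome").getD "") else "Em Branco") = pvNomeA item from rfl]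
    rw [show [(("id" : String), (pvLookup item "id").getD ""), (("nome" : String), pvNomeA item)]
          = pvFmtA item from rfl]
    by_cases h : pvNomeA item = "Em Branco" ∨ pvNomeA item = ""
    · have hk : (pvKeyA (pvFmtA item) == "") = true := by
        simp [(pv_keyA_eq_empty_iff item).mpr h]
      rw [if_pos h, ih]
      simp [hk]
    · have hk : (pvKeyA (pvFmtA item) == "") = false := by
        simp only [beq_eq_false_iff_ne, ne_eq]
        exact fun hc => h ((pv_keyA_eq_empty_iff item).mp hc)
      rw [if_neg h, ih]
      simp [hk]
-- ===== VERDICT (by name: the statement is the Claim_ definition above) =====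
theorem format_and_sort_items_spec : Claim_equal_format_and_sort_items := by
  intro items _ _
  unfold Spec_format_and_sort_items format_and_sort_items format_and_sort_items_alt
  rw [pv_fold_partition items [] []]
  simp only [List.nil_append]
  rw [pv_sorted_split (items.map pvFmtA)]
  congr 1
  apply pv_sorted_congr
  intro y hy
  have hy' : ¬ pvKeyA y = "" := by simpa using List.of_mem_filter hy
  simp only [pvKeyA] at hy' ⊢
  by_cases h : (pvLookup y "nome").getD "" = "Em Branco"
  · exact absurd (by simp [h]) hy'
  · simp [pvKeyB, h]
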